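-- pv_equiv track=rewrite | github.com/roykroth/Project_Euler | problem19.py | dayofmonth
-- ===== SOURCE A (Python) =====
-- def isleapyear(year):
--     if year%4 == 0:
--         if year%100 > 0:
--             return True
--         else:
--             if year%400 == 0:
--                 return True
--             else:
--                 return False
--     else:
--         return False
--
-- def daysinmonth(month, leap = False):
--     if month == 2:
--         if leap:
--             return 29
--         else:
--             return 28
--     elif month in [1,3,5,7,8,10,12]:
--         return 31
--     else:
--         return 30
--
-- def dayofmonth(startday = 1, startmonth = 1, startyear = 1900, endyear = 2000):
--     day = startday
--     month = startmonth
--     year = startyear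
--     dom = 1
--     yield dom
--     while True:
--         leap = isleapyear(year)
--         days = daysinmonth(month, leap)
--         if dom < days:
--             dom += 1
--         else:
--             month += 1
--             dom = 1
--             if month == 13:
--                 month = 1
--                 year += 1
--                 if year > endyear:
--                     break
--         yield dom
-- ===== SOURCE B (Python) =====
-- def isleapyear(year):
--     if year%4 == 0:
--         if year%100 > 0:
--             return True
--         else:
--             if year%400 == 0:
--                 return True
--             else:
--                 return False
--     else:
--         return False
--
-- def daysinmonth(month, leap = False):
--     if month == 2:
--         if leap:
--             return 29
--         else:
--             return 28
--     elif month in [1,3,5,7,8,10,12]: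
--         return 31
--     else:
--         return 30
--
-- def dayofmonth(startday = 1, startmonth = 1, startyear = 1900, endyear = 2000):
--     # nested loops instead of A's manual dom/month/year carry state machine
--     for year in range(startyear, max(startyear, endyear) + 1):
--         firstmonth = startmonth if year == startyear else 1
--         for month in range(firstmonth, 13):
--             days = daysinmonth(month, isleapyear(year))
--             for dom in range(1, days + 1):
--                 yield dom
-- ===== Notes on version B (the rewrite author's own statement) =====
-- stated objective: simpler
-- what changed: Replaces A's infinite while-loop state machine with manual dom/month/year carry and break by three plain nested for-loops over range(), yielding range(1, days+1) per month.
import Mathlib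
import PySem

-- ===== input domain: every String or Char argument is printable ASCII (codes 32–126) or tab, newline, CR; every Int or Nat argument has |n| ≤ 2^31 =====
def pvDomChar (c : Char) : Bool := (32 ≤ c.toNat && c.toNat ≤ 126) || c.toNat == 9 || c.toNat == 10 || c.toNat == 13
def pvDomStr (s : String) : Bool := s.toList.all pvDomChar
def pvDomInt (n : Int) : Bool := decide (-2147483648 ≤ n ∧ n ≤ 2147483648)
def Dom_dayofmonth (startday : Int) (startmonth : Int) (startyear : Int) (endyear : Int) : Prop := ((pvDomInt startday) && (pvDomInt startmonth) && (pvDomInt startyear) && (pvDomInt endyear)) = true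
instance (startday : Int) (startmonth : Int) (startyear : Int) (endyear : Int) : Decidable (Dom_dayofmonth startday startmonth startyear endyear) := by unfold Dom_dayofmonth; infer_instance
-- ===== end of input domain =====

-- B rewrites A's while-True state machine (manual dom/month/year carry and break) as three nested for-loops over ranges; return-value equivalence is proved on Pre_ (startmonth ≤ 12).

-- ===== PORT A =====
-- shared helpers (identical in Source A and Source B)
def isleapyearP (year : Int) : Bool :=
  if PySem.Int.mod year 4 == 0 then
    (if PySem.Int.mod year 100 > 0 then true
     else (if PySem.Int.mod year 400 == 0 then true else false))
  else false

def daysinmonthP (month : Int) (leap : Bool) : Int :=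
  if month == 2 then (if leap then 29 else 28)
  else if month ∈ ([1,3,5,7,8,10,12] : List Int) then 31 else 30

-- A's `while True` loop, one fuel unit per iteration (each iteration yields one value);
-- the fuel passed below is a totality guard only: it exceeds the number of iterations
-- whenever the Python loop terminates (startmonth ≤ 12, i.e. Pre_).
def dayLoop (fuel : Nat) (endyear month year dom : Int) : List Int :=
  match fuel with
  | 0 => []
  | Nat.succ f =>
    let leap := isleapyearP year
    let days := daysinmonthP month leap
    if dom < days then (dom + 1) :: dayLoop f endyear month year (dom + 1)
    else
      if month + 1 == 13 then
        (if year + 1 > endyear then []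
         else (1 : Int) :: dayLoop f endyear 1 (year + 1) 1)
      else (1 : Int) :: dayLoop f endyear (month + 1) year 1

def dayofmonth (startday : Int) (startmonth : Int) (startyear : Int) (endyear : Int) : List Int :=
  1 :: dayLoop (31 * (13 - startmonth).toNat + 372 * (endyear - startyear).toNat + 1)
        endyear startmonth startyear 1

-- ===== PORT B =====
def daysListB (year month : Int) : List Int :=
  PySem.List.pyRange 1 (daysinmonthP month (isleapyearP year) + 1) 1

def dayofmonth_alt (startday : Int) (startmonth : Int) (startyear : Int) (endyear : Int) : List Int :=
  (PySem.List.pyRange startyear (max startyear endyear + 1) 1).flatMap (fun year =>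
    (PySem.List.pyRange (if year == startyear then startmonth else 1) 13 1).flatMap (fun month =>
      daysListB year month))

-- ===== PRECONDITION & SPEC =====
-- Pre_ excludes startmonth ≥ 13, on which A's while loop never reaches the month == 13
-- reset and DIVERGES (yields forever, never returns a list); B returns a finite list there.
def Pre_dayofmonth (startday : Int) (startmonth : Int) (startyear : Int) (endyear : Int) : Prop :=
  startmonth ≤ 12

instance (startday : Int) (startmonth : Int) (startyear : Int) (endyear : Int) : Decidable (Pre_dayofmonth startday startmonth startyear endyear) := by unfold Pre_dayofmonth; infer_instance

def pvWitness_dayofmonth : Int × Int × Int × Int := (1, 11, 1999, 2001)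

def Spec_dayofmonth (startday : Int) (startmonth : Int) (startyear : Int) (endyear : Int) (out : List Int) : Prop := out = dayofmonth_alt startday startmonth startyear endyear
instance (startday : Int) (startmonth : Int) (startyear : Int) (endyear : Int) (out : List Int) : Decidable (Spec_dayofmonth startday startmonth startyear endyear out) := by unfold Spec_dayofmonth; infer_instance

-- ===== CLAIM (what is proved, stated in full; the proofs are below) =====
def Claim_equal_dayofmonth : Prop := ∀ (startday : Int) (startmonth : Int) (startyear : Int) (endyear : Int), Dom_dayofmonth startday startmonth startyear endyear → Pre_dayofmonth startday startmonth startyear endyear → Spec_dayofmonth startday startmonth startyear endyear (dayofmonth startday startmonth startyear endyear)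

-- ===== LEMMAS AND PROOFS =====

-- proof-side reference decomposition of the remaining output from a loop state
def monthsTail (y m : Int) : List Int :=
  (PySem.List.pyRange m 13 1).flatMap (daysListB y)

def yearTail (e y : Int) : List Int :=
  (PySem.List.pyRange y (e + 1) 1).flatMap (fun yr => monthsTail yr 1)

def specFrom (e m y dom : Int) : List Int :=
  PySem.List.pyRange dom (daysinmonthP m (isleapyearP y) + 1) 1 ++ monthsTail y (m + 1) ++ yearTail e (y + 1)

theorem days_bounds (m : Int) (b : Bool) : 28 ≤ daysinmonthP m b ∧ daysinmonthP m b ≤ 31 := by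
  unfold daysinmonthP; split_ifs <;> norm_num

theorem flatMap_length_le (l : List Int) (f : Int → List Int) (c : Nat)
    (h : ∀ x ∈ l, (f x).length ≤ c) : (l.flatMap f).length ≤ c * l.length := by
  induction l with
  | nil => simp
  | cons a t ih =>
    simp only [List.flatMap_cons, List.length_append, List.length_cons]
    have := h a (by simp)
    have := ih (fun x hx => h x (by simp [hx]))
    nlinarith

theorem daysListB_len (y m : Int) : (daysListB y m).length ≤ 31 := by
  have h := days_bounds m (isleapyearP y)
  simp only [daysListB, PySem.List.length_pyRange_one]
  omega

theorem monthsTail_len (y m : Int) : (monthsTail y m).length ≤ 31 * (13 - m).toNat := by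
  have h := flatMap_length_le (PySem.List.pyRange m 13 1) (daysListB y) 31
    (fun x _ => daysListB_len y x)
  simpa [monthsTail, PySem.List.length_pyRange_one] using h

theorem yearTail_len (e y : Int) : (yearTail e y).length ≤ 372 * ((e + 1) - y).toNat := by
  have h := flatMap_length_le (PySem.List.pyRange y (e+1) 1) (fun yr => monthsTail yr 1) 372
    (fun x _ => by simpa using monthsTail_len x 1)
  simpa [yearTail, PySem.List.length_pyRange_one] using h

theorem flatMap_congr_mem (l : List Int) (f g : Int → List Int)
    (h : ∀ x ∈ l, f x = g x) : l.flatMap f = l.flatMap g := by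
  induction l with
  | nil => rfl
  | cons a t ih =>
    simp only [List.flatMap_cons]
    rw [h a (by simp), ih (fun x hx => h x (by simp [hx]))]

-- one loop iteration matches one step of the reference decomposition
theorem dayLoop_take (fuel : Nat) : ∀ (e m y dom : Int),
    1 ≤ dom → dom ≤ daysinmonthP m (isleapyearP y) → m ≤ 12 →
    dom :: dayLoop fuel e m y dom = (specFrom e m y dom).take (fuel + 1) := by
  induction fuel with
  | zero =>
    intro e m y dom _ h2 _
    have hlt : dom < daysinmonthP m (isleapyearP y) + 1 := by omega
    simp [dayLoop, specFrom, PySem.List.pyRange_one_cons hlt]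
  | succ f ih =>
    intro e m y dom h1 h2 h3
    have hlt : dom < daysinmonthP m (isleapyearP y) + 1 := by omega
    rw [dayLoop]
    by_cases hd : dom < daysinmonthP m (isleapyearP y)
    · have hEq : specFrom e m y dom = dom :: specFrom e m y (dom + 1) := by
        rw [specFrom, specFrom, PySem.List.pyRange_one_cons hlt]; rfl
      rw [if_pos hd, ih e m y (dom+1) (by omega) (by omega) h3, hEq, List.take_succ_cons]
    · rw [if_neg hd]
      have hde : dom = daysinmonthP m (isleapyearP y) := by omega
      have hsing : PySem.List.pyRange dom (daysinmonthP m (isleapyearP y) + 1) 1 = [dom] := by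
        rw [hde]; exact PySem.List.pyRange_one_singleton _
      by_cases hm : m + 1 = 13
      · rw [if_pos (by simp [hm])]
        have hmt : monthsTail y (m + 1) = [] := by
          rw [hm, monthsTail, PySem.List.pyRange_one_eq_nil (by omega)]; rfl
        by_cases hy : y + 1 > e
        · rw [if_pos hy]
          have hyt : yearTail e (y + 1) = [] := by
            rw [yearTail, PySem.List.pyRange_one_eq_nil (by omega)]; rfl
          simp [specFrom, hsing, hmt, hyt]
        · rw [if_neg hy]
          have hyt : yearTail e (y + 1) = specFrom e 1 (y + 1) 1 := by
            rw [yearTail, PySem.List.pyRange_one_cons (by omega : y + 1 < e + 1), List.flatMap_cons]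
            have hmm : monthsTail (y+1) 1 =
                PySem.List.pyRange 1 (daysinmonthP 1 (isleapyearP (y+1)) + 1) 1 ++ monthsTail (y+1) (1+1) := by
              rw [monthsTail, PySem.List.pyRange_one_cons (by norm_num : (1:Int) < 13), List.flatMap_cons]; rfl
            rw [hmm, specFrom, yearTail]
          have hEq : specFrom e m y dom = dom :: specFrom e 1 (y + 1) 1 := by
            rw [specFrom, hsing, hmt, hyt]; rfl
          rw [ih e 1 (y+1) 1 (by norm_num) (by have := days_bounds 1 (isleapyearP (y+1)); omega) (by norm_num),
            hEq, List.take_succ_cons]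
      · rw [if_neg (by simp [hm])]
        have hmt : monthsTail y (m + 1) =
            PySem.List.pyRange 1 (daysinmonthP (m+1) (isleapyearP y) + 1) 1 ++ monthsTail y (m + 1 + 1) := by
          rw [monthsTail, PySem.List.pyRange_one_cons (by omega : m + 1 < 13), List.flatMap_cons]; rfl
        have hEq : specFrom e m y dom = dom :: specFrom e (m+1) y 1 := by
          rw [specFrom, specFrom, hsing, hmt]
          simp [List.append_assoc]
        rw [ih e (m+1) y 1 (by norm_num) (by have := days_bounds (m+1) (isleapyearP y); omega) (by omega),
          hEq, List.take_succ_cons]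

theorem alt_eq_specFrom (sm sy ey : Int) (hsm : sm ≤ 12) (sd : Int) :
    dayofmonth_alt sd sm sy ey = specFrom ey sm sy 1 := by
  rw [dayofmonth_alt]
  have h1 : sy < max sy ey + 1 := by have := le_max_left sy ey; omega
  rw [PySem.List.pyRange_one_cons h1, List.flatMap_cons]
  have hrest : PySem.List.pyRange (sy + 1) (max sy ey + 1) 1 = PySem.List.pyRange (sy + 1) (ey + 1) 1 := by
    rcases le_or_gt sy ey with h | h
    · rw [max_eq_right h]
    · rw [max_eq_left (le_of_lt h), PySem.List.pyRange_one_eq_nil (by omega),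
        PySem.List.pyRange_one_eq_nil (by omega)]
  rw [hrest]
  have hcongr : (PySem.List.pyRange (sy + 1) (ey + 1) 1).flatMap (fun year =>
      (PySem.List.pyRange (if year == sy then sm else 1) 13 1).flatMap (fun month => daysListB year month))
      = yearTail ey (sy + 1) := by
    rw [yearTail]
    apply flatMap_congr_mem
    intro x hx
    have := (PySem.List.mem_pyRange_one.mp hx).1
    have hne : (x == sy) = false := by simp; omega
    rw [hne]
    rfl
  rw [hcongr]
  have hfirst : (PySem.List.pyRange (if sy == sy then sm else 1) 13 1).flatMap (fun month => daysListB sy month)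
      = PySem.List.pyRange 1 (daysinmonthP sm (isleapyearP sy) + 1) 1 ++ monthsTail sy (sm + 1) := by
    simp only [beq_self_eq_true, if_true]
    rw [PySem.List.pyRange_one_cons (by omega : sm < 13), List.flatMap_cons]
    rfl
  rw [hfirst, specFrom, List.append_assoc]

theorem specFrom_len (sm sy ey : Int) (hsm : sm ≤ 12) :
    (specFrom ey sm sy 1).length ≤ 31 * (13 - sm).toNat + 372 * (ey - sy).toNat + 2 := by
  have h1 := days_bounds sm (isleapyearP sy)
  have h2 := monthsTail_len sy (sm + 1)
  have h3 := yearTail_len ey (sy + 1)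
  simp only [specFrom, List.length_append, PySem.List.length_pyRange_one]
  omega

-- ===== VERDICT (by name: the statement is the Claim_ definition above) =====
theorem dayofmonth_spec : Claim_equal_dayofmonth := by
  intro sd sm sy ey _ hpre
  unfold Spec_dayofmonth dayofmonth
  have hsm : sm ≤ 12 := hpre
  have hdays := days_bounds sm (isleapyearP sy)
  rw [dayLoop_take _ ey sm sy 1 (by norm_num) (by omega) hsm]
  rw [alt_eq_specFrom sm sy ey hsm sd]
  apply List.take_of_length_le
  have := specFrom_len sm sy ey hsm
  omega
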